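-- pv_equiv track=rewrite | github.com/vvw12345/csi_project | data_processing/movement_detective.py | get_activity_intervals
-- ===== SOURCE A (Python) =====
-- def get_activity_intervals(activities, grace_period=400):
--     intervals = []
--     start_activity = None
--     no_activity_count = 0
--
--     for i, activity in enumerate(activities):
--         if activity == 1 and start_activity is None:
--             start_activity = i
--         elif activity == 0:
--             if start_activity is not None:
--                 no_activity_count += 1
--                 if no_activity_count > grace_period:
--                     intervals.append((start_activity, i - no_activity_count))
--                     start_activity = None
--                     no_activity_count = 0
--         else:
--             no_activity_count = 0
--
--     # 如果在最后还有持续的动作，添加区间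
--     if start_activity is not None:
--         intervals.append((start_activity, len(activities)))
--
--     return intervals
-- ===== SOURCE B (Python) =====
-- def get_activity_intervals(activities, grace_period=400):
--     # run-length encode: maximal runs as (value, start_index, length)
--     runs = []
--     n = len(activities)
--     i = 0
--     while i < n:
--         j = i + 1
--         while j < n and activities[j] == activities[i]:
--             j += 1
--         runs.append((activities[i], i, j - i))
--         i = j
--
--     intervals = []
--     start = None
--     for v, s, length in runs:
--         if v == 1 and start is None:
--             start = s
--         elif v == 0 and start is not None and length > grace_period:
--             intervals.append((start, s - 1))
--             start = None
--     if start is not None: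
--         intervals.append((start, n))
--     return intervals
-- ===== Notes on version B (the rewrite author's own statement) =====
-- stated objective: alternative
-- what changed: Replaces A's single element-wise scan with a mutable no_activity_count grace counter by a two-phase decomposition: first run-length encode the list into maximal (value, start, length) runs, then decide open/close per run (a 0-run closes the open interval iff its length exceeds grace_period, with end = run_start - 1), eliminating the counter state entirely.
import Mathlib
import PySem

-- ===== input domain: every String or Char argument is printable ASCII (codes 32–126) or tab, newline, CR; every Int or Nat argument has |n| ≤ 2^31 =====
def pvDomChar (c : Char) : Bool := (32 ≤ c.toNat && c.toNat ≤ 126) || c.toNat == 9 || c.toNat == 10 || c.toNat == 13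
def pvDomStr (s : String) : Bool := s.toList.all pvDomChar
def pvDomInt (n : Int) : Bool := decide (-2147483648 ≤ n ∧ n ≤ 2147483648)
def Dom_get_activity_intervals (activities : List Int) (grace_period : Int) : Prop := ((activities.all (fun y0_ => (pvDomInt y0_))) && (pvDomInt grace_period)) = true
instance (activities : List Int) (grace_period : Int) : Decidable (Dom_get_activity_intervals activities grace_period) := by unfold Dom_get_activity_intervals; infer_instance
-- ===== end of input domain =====

-- B replaces A's element-wise grace counter by a two-phase run-length decomposition
-- (build maximal runs, then decide open/close per run); objective: alternative, equal cost.

-- ===== PORT A =====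
-- A's for-loop over enumerate(activities) with state (intervals, start_activity, no_activity_count)
def pvLoopA (g : Int) : Int → List (Int × Int) → Option Int → Int → List Int → (List (Int × Int) × Option Int × Int)
  | _, acc, st, c, [] => (acc, st, c)
  | i, acc, st, c, a :: rest =>
    if a = 1 ∧ st = none then pvLoopA g (i + 1) acc (some i) c rest
    else if a = 0 then
      match st with
      | some s0 =>
        if c + 1 > g then pvLoopA g (i + 1) (acc ++ [(s0, i - (c + 1))]) none 0 rest
        else pvLoopA g (i + 1) acc (some s0) (c + 1) rest
      | none => pvLoopA g (i + 1) acc none c rest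
    else pvLoopA g (i + 1) acc st 0 rest

def get_activity_intervals (activities : List Int) (grace_period : Int) : List (Int × Int) :=
  let r := pvLoopA grace_period 0 [] none 0 activities
  match r.2.1 with
  | some s0 => r.1 ++ [(s0, (activities.length : Int))]
  | none => r.1

-- ===== PORT B =====
-- the outer while loop of Source B: maximal runs (value, start_index, length); the inner while loop is the takeWhile/dropWhile split
def pvRuns : Int → List Int → List (Int × Int × Int)
  | _, [] => []
  | i, v :: rest =>
    let pre := rest.takeWhile (fun x => x == v)
    let post := rest.dropWhile (fun x => x == v)
    (v, i, (1 : Int) + pre.length) :: pvRuns (i + 1 + pre.length) post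
  termination_by _ l => l.length
  decreasing_by
    simpa using Nat.lt_succ_of_le (List.length_dropWhile_le _ rest)

-- Source B's for-loop over the runs with state (intervals, start)
def pvLoopB (g : Int) : List (Int × Int) → Option Int → List (Int × Int × Int) → (List (Int × Int) × Option Int)
  | acc, st, [] => (acc, st)
  | acc, st, (v, s, len) :: rest =>
    if v = 1 ∧ st = none then pvLoopB g acc (some s) rest
    else
      match st with
      | some s0 => if v = 0 ∧ len > g then pvLoopB g (acc ++ [(s0, s - 1)]) none rest
                   else pvLoopB g acc (some s0) rest
      | none => pvLoopB g acc none rest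

def get_activity_intervals_alt (activities : List Int) (grace_period : Int) : List (Int × Int) :=
  let r := pvLoopB grace_period [] none (pvRuns 0 activities)
  match r.2 with
  | some s0 => r.1 ++ [(s0, (activities.length : Int))]
  | none => r.1

-- ===== PRECONDITION & SPEC =====
def Spec_get_activity_intervals (activities : List Int) (grace_period : Int) (out : List (Int × Int)) : Prop := out = get_activity_intervals_alt activities grace_period
instance (activities : List Int) (grace_period : Int) (out : List (Int × Int)) : Decidable (Spec_get_activity_intervals activities grace_period out) := by unfold Spec_get_activity_intervals; infer_instance

-- ===== CLAIM (what is proved, stated in full; the proofs are below) =====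
def Claim_equal_get_activity_intervals : Prop := ∀ (activities : List Int) (grace_period : Int), Dom_get_activity_intervals activities grace_period → Spec_get_activity_intervals activities grace_period (get_activity_intervals activities grace_period)

-- ===== LEMMAS AND PROOFS =====

-- a segment of 1s while an interval is open and the counter is 0 changes nothing but the index
theorem pvSeg1 (g : Int) (l : List Int) (h : ∀ x ∈ l, x = (1 : Int)) :
    ∀ (i : Int) (acc : List (Int × Int)) (s : Int) (rest : List Int),
      pvLoopA g i acc (some s) 0 (l ++ rest) = pvLoopA g (i + l.length) acc (some s) 0 rest := by
  induction l with
  | nil => intro i acc s rest; simp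
  | cons a l ih =>
    intro i acc s rest
    have ha : a = 1 := h a (by simp)
    have hl : ∀ x ∈ l, x = (1 : Int) := fun x hx => h x (by simp [hx])
    subst ha
    simp only [List.cons_append, pvLoopA]
    rw [if_neg (by simp), if_neg (by norm_num)]
    rw [ih hl]
    congr 1
    simp only [List.length_cons]
    push_cast
    ring

-- a segment of a value other than 0 and 1 resets the counter and touches nothing else
theorem pvSegO (g : Int) (v : Int) (hv0 : v ≠ 0) (hv1 : v ≠ 1) (l : List Int)
    (h : ∀ x ∈ l, x = v) :
    ∀ (i : Int) (acc : List (Int × Int)) (st : Option Int) (rest : List Int),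
      pvLoopA g i acc st 0 (l ++ rest) = pvLoopA g (i + l.length) acc st 0 rest := by
  induction l with
  | nil => intro i acc st rest; simp
  | cons a l ih =>
    intro i acc st rest
    have ha : a = v := h a (by simp)
    have hl : ∀ x ∈ l, x = v := fun x hx => h x (by simp [hx])
    subst ha
    simp only [List.cons_append, pvLoopA]
    rw [if_neg (by tauto), if_neg hv0]
    rw [ih hl]
    congr 1
    simp only [List.length_cons]
    push_cast
    ring

-- a segment of 0s while no interval is open is skipped
theorem pvSeg0none (g : Int) (l : List Int) (h : ∀ x ∈ l, x = (0 : Int)) :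
    ∀ (i : Int) (acc : List (Int × Int)) (c : Int) (rest : List Int),
      pvLoopA g i acc none c (l ++ rest) = pvLoopA g (i + l.length) acc none c rest := by
  induction l with
  | nil => intro i acc c rest; simp
  | cons a l ih =>
    intro i acc c rest
    have ha : a = 0 := h a (by simp)
    have hl : ∀ x ∈ l, x = (0 : Int) := fun x hx => h x (by simp [hx])
    subst ha
    simp only [List.cons_append, pvLoopA]
    rw [if_neg (by simp), if_pos trivial]
    rw [ih hl]
    congr 1
    simp only [List.length_cons]
    push_cast
    ring

-- a segment of 0s while an interval (s) is open, entered with counter c ≤ g: either the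
-- grace period is exceeded inside the segment (interval closed with end i - c - 1) or the
-- counter just grows by the segment length
theorem pvSeg0some (g : Int) (l : List Int) (h : ∀ x ∈ l, x = (0 : Int)) :
    ∀ (i : Int) (acc : List (Int × Int)) (s : Int) (c : Int) (rest : List Int), c ≤ g →
      pvLoopA g i acc (some s) c (l ++ rest) =
        if g < c + l.length
        then pvLoopA g (i + l.length) (acc ++ [(s, i - c - 1)]) none 0 rest
        else pvLoopA g (i + l.length) acc (some s) (c + l.length) rest := by
  induction l with
  | nil =>
    intro i acc s c rest hc
    rw [if_neg (by simp only [List.length_nil, Nat.cast_zero, add_zero]; omega)]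
    simp
  | cons a l ih =>
    intro i acc s c rest hc
    have ha : a = 0 := h a (by simp)
    have hl : ∀ x ∈ l, x = (0 : Int) := fun x hx => h x (by simp [hx])
    subst ha
    simp only [List.cons_append, pvLoopA]
    rw [if_neg (by simp), if_pos trivial]
    by_cases hclose : c + 1 > g
    · rw [if_pos hclose]
      rw [pvSeg0none g l hl]
      rw [if_pos (by simp only [List.length_cons]; push_cast; omega)]
      have he : i - (c + 1) = i - c - 1 := by ring
      rw [he]
      congr 1
      simp only [List.length_cons]
      push_cast
      ring
    · rw [if_neg hclose]
      rw [ih hl (i + 1) acc s (c + 1) rest (by omega)]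
      by_cases hb : g < c + 1 + (l.length : Int)
      · rw [if_pos hb, if_pos (by simp only [List.length_cons]; push_cast at hb ⊢; omega)]
        have he : i + 1 - (c + 1) - 1 = i - c - 1 := by ring
        rw [he]
        congr 1
        simp only [List.length_cons]
        push_cast
        ring
      · rw [if_neg hb, if_neg (by simp only [List.length_cons]; push_cast at hb ⊢; omega)]
        congr 1 <;> simp only [List.length_cons] <;> push_cast <;> ring

-- main invariant: from any run boundary, A's loop and B's loop over the runs agree on
-- (intervals, start); c is 0 whenever no interval is open and whenever a 0-run begins
theorem pvKey (g : Int) : ∀ (n : Nat) (acts : List Int), acts.length = n →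
    ∀ (i : Int) (acc : List (Int × Int)) (st : Option Int) (c : Int),
      0 ≤ c → (st = none → c = 0) → (acts.head? = some 0 → c = 0) →
      ((pvLoopA g i acc st c acts).1, (pvLoopA g i acc st c acts).2.1) =
        pvLoopB g acc st (pvRuns i acts) := by
  intro n
  induction n using Nat.strong_induction_on with
  | _ n ih =>
    intro acts hlen i acc st c hc0 h1 h2
    match acts with
    | [] => simp [pvLoopA, pvRuns, pvLoopB]
    | v :: rest =>
      have hsplit : rest.takeWhile (fun x => x == v) ++ rest.dropWhile (fun x => x == v) = rest :=
        List.takeWhile_append_dropWhile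
      set pre := rest.takeWhile (fun x => x == v) with hpre
      set post := rest.dropWhile (fun x => x == v) with hpost
      have hprev : ∀ x ∈ pre, x = v := by
        intro x hx
        have := List.mem_takeWhile_imp hx
        simpa using this
      have hposthead : ∀ y, post.head? = some y → y ≠ v := by
        intro y hy
        have := List.head?_dropWhile_not (fun x => x == v) rest
        rw [← hpost, hy] at this
        simpa using this
      have hpostlen : post.length < n := by
        have hle : post.length ≤ rest.length := List.length_dropWhile_le _ _
        simp only [← hlen, List.length_cons]
        omega
      have hruns : pvRuns i (v :: rest) =
          (v, i, (1 : Int) + pre.length) :: pvRuns (i + 1 + pre.length) post := by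
        rw [pvRuns]
      rw [hruns]
      have hacts : v :: rest = v :: (pre ++ post) := by rw [hsplit]
      rw [hacts]
      by_cases hv1 : v = 1
      · subst hv1
        match st with
        | none =>
          have hc : c = 0 := h1 rfl
          subst hc
          simp only [pvLoopA, pvLoopB]
          rw [if_pos (by simp), if_pos (by simp)]
          rw [pvSeg1 g pre hprev]
          exact ih post.length hpostlen post rfl (i + 1 + pre.length) acc (some i) 0
            le_rfl (by simp) (fun _ => rfl)
        | some s0 =>
          simp only [pvLoopA, pvLoopB]
          rw [if_neg (by simp), if_neg (by norm_num), if_neg (by simp)]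
          rw [if_neg (by simp)]
          rw [pvSeg1 g pre hprev]
          exact ih post.length hpostlen post rfl (i + 1 + pre.length) acc (some s0) 0
            le_rfl (by simp) (fun _ => rfl)
      · by_cases hv0 : v = 0
        · subst hv0
          match st with
          | none =>
            have hc : c = 0 := h1 rfl
            subst hc
            simp only [pvLoopA, pvLoopB]
            rw [if_neg (by simp), if_pos trivial, if_neg (by simp)]
            rw [pvSeg0none g pre hprev]
            exact ih post.length hpostlen post rfl (i + 1 + pre.length) acc none 0
              le_rfl (fun _ => rfl) (fun _ => rfl)
          | some s0 =>
            have hc : c = 0 := h2 rfl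
            subst hc
            simp only [pvLoopA, pvLoopB]
            rw [if_neg (by simp), if_pos trivial]
            by_cases hclose : (0 : Int) + 1 > g
            · rw [if_pos hclose]
              rw [pvSeg0none g pre hprev]
              rw [if_neg (by simp)]
              rw [if_pos (by refine ⟨by simp, ?_⟩; omega)]
              have he : i - (0 + 1) = i - 1 := by ring
              rw [he]
              exact ih post.length hpostlen post rfl (i + 1 + pre.length)
                (acc ++ [(s0, i - 1)]) none 0 le_rfl (fun _ => rfl) (fun _ => rfl)
            · rw [if_neg hclose]
              rw [pvSeg0some g pre hprev (i + 1) acc s0 (0 + 1) post (by omega)]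
              by_cases hb : g < 0 + 1 + (pre.length : Int)
              · rw [if_pos (by push_cast at hb ⊢; omega)]
                rw [if_neg (by simp)]
                rw [if_pos (by refine ⟨by simp, ?_⟩; push_cast at hb ⊢; omega)]
                have he : i + 1 - (0 + 1) - 1 = i - 1 := by ring
                rw [he]
                have hidx : i + 1 + (pre.length : Int) = i + 1 + pre.length := by ring
                rw [hidx]
                exact ih post.length hpostlen post rfl (i + 1 + pre.length)
                  (acc ++ [(s0, i - 1)]) none 0 le_rfl (fun _ => rfl) (fun _ => rfl)
              · rw [if_neg (by push_cast at hb ⊢; omega)]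
                rw [if_neg (by simp)]
                rw [if_neg (by rintro ⟨-, hcc⟩; push_cast at hb hcc; omega)]
                have hidx : i + 1 + (pre.length : Int) = i + 1 + pre.length := by ring
                rw [hidx]
                exact ih post.length hpostlen post rfl (i + 1 + pre.length) acc (some s0)
                  (0 + 1 + pre.length) (by positivity) (by simp) (fun hh =>
                    absurd rfl (hposthead 0 hh))
        · -- v ∉ {0, 1}
          match st with
          | none =>
            have hc : c = 0 := h1 rfl
            subst hc
            simp only [pvLoopA, pvLoopB]
            rw [if_neg (by tauto), if_neg hv0, if_neg (by tauto)]
            rw [pvSegO g v hv0 hv1 pre hprev]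
            exact ih post.length hpostlen post rfl (i + 1 + pre.length) acc none 0
              le_rfl (fun _ => rfl) (fun _ => rfl)
          | some s0 =>
            simp only [pvLoopA, pvLoopB]
            rw [if_neg (by tauto), if_neg hv0, if_neg (by tauto)]
            rw [if_neg (by tauto)]
            rw [pvSegO g v hv0 hv1 pre hprev]
            exact ih post.length hpostlen post rfl (i + 1 + pre.length) acc (some s0) 0
              le_rfl (by simp) (fun _ => rfl)

-- ===== VERDICT (by name: the statement is the Claim_ definition above) =====
theorem get_activity_intervals_spec : Claim_equal_get_activity_intervals := by
  intro activities grace_period _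
  unfold Spec_get_activity_intervals get_activity_intervals get_activity_intervals_alt
  have h := pvKey grace_period activities.length activities rfl 0 [] none 0
    le_rfl (fun _ => rfl) (fun _ => rfl)
  simp only []
  rw [← h]
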